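-- pv_equiv track=rewrite | github.com/android2600/Leetcode-Problems | 50. Sum the Difference.py | solve
-- ===== SOURCE A (Python) =====
-- def solve(A):
--     A.sort()
--     sum_=0
--     for i in range(len(A)):
--         add_count=(1<<i)-1
--         sub_count=(1<<(len(A)-i-1))-1
--         sum_+= A[i]*(add_count-sub_count)
--
--     return sum_
-- ===== SOURCE B (Python) =====
-- def solve(A):
--     # Sorts A in place like the original; same mutation, same return value.
--     A.sort()
--     total = 0
--     pw = 1   # 2^k where k elements processed so far
--     m = 0    # sum over processed prefix of A[i] * 2^(k-1-i)  (weighted "min" accumulator)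
--     for x in A:
--         total += x * (pw - 1) - m
--         m = 2 * m + x
--         pw <<= 1
--     return total
-- ===== Notes on version B (the rewrite author's own statement) =====
-- stated objective: alternative
-- what changed: Replaces the per-index closed-form weights (1<<i)-1 and (1<<(n-i-1))-1 computed from the list length with a single incremental pass over the sorted list that maintains a running power of two and a running weighted min-sum, adding each new element's contribution as the new maximum.
import Mathlib
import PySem

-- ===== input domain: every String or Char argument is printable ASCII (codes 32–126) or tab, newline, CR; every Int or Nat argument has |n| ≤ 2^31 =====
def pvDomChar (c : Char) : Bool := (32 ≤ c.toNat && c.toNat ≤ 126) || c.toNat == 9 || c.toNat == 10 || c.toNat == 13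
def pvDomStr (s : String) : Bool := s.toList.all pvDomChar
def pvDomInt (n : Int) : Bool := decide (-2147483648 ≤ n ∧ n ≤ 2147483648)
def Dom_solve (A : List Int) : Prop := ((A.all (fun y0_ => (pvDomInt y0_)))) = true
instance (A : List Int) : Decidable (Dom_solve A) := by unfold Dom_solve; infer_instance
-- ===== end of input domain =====

-- B replaces A's per-index closed-form weights with one incremental pass over the sorted list
-- (running power of two + weighted prefix accumulator); both Pythons sort the argument in place,
-- and the equivalence proved here is about the return value.


-- ===== PORT A =====
def solve (A : List Int) : Int :=
  let s := PySem.List.sorted A (fun x => x) false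
  (PySem.List.pyRange 0 (s.length : Int) 1).foldl
    (fun sum_ i =>
      let add_count : Int := ((1 <<< i.toNat : Nat) : Int) - 1
      let sub_count : Int := ((1 <<< ((s.length : Int) - i - 1).toNat : Nat) : Int) - 1
      sum_ + PySem.List.pyGetD s i 0 * (add_count - sub_count)) 0

-- ===== PORT B =====
def solve_alt (A : List Int) : Int :=
  let s := PySem.List.sorted A (fun x => x) false
  (s.foldl
    (fun (st : Int × Int × Int) x =>
      (st.1 + x * (st.2.1 - 1) - st.2.2, st.2.1 <<< (1 : Nat), 2 * st.2.2 + x))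
    (0, 1, 0)).1

-- ===== PRECONDITION & SPEC =====
def Spec_solve (A : List Int) (out : Int) : Prop := out = solve_alt A
instance (A : List Int) (out : Int) : Decidable (Spec_solve A out) := by unfold Spec_solve; infer_instance

-- ===== CLAIM (what is proved, stated in full; the proofs are below) =====
def Claim_equal_solve : Prop := ∀ (A : List Int), Dom_solve A → Spec_solve A (solve A)

-- ===== LEMMAS AND PROOFS =====

-- the two sums B's loop invariant tracks, over any list s
def pvT (s : List Int) : Int :=
  ∑ k ∈ Finset.range s.length, s.getD k 0 * ((2:Int) ^ k - 2 ^ (s.length - 1 - k))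
def pvM (s : List Int) : Int :=
  ∑ k ∈ Finset.range s.length, s.getD k 0 * (2:Int) ^ (s.length - 1 - k)

lemma getD_append_lt (s : List Int) (x : Int) (k : Nat) (hk : k < s.length) :
    (s ++ [x]).getD k 0 = s.getD k 0 := by
  rw [List.getD_eq_getElem?_getD, List.getD_eq_getElem?_getD, List.getElem?_append_left hk]

lemma getD_append_self (s : List Int) (x : Int) :
    (s ++ [x]).getD s.length 0 = x := by
  rw [List.getD_eq_getElem?_getD]; simp

lemma sum_append_split (s : List Int) (x : Int) (f : Nat → Int) :
    (∑ k ∈ Finset.range (s.length + 1), (s ++ [x]).getD k 0 * f k)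
    = (∑ k ∈ Finset.range s.length, s.getD k 0 * f k) + x * f s.length := by
  rw [Finset.sum_range_succ, getD_append_self]
  congr 1
  exact Finset.sum_congr rfl (fun k hk => by
    rw [getD_append_lt s x k (Finset.mem_range.mp hk)])

lemma pvM_append (s : List Int) (x : Int) :
    pvM (s ++ [x]) = 2 * pvM s + x := by
  unfold pvM
  simp only [List.length_append, List.length_singleton]
  rw [sum_append_split]
  have he0 : s.length + 1 - 1 - s.length = 0 := by omega
  rw [he0, pow_zero, mul_one, Finset.mul_sum]
  congr 1
  refine Finset.sum_congr rfl (fun k hk => ?_)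
  have hk' := Finset.mem_range.mp hk
  have he : s.length + 1 - 1 - k = (s.length - 1 - k) + 1 := by omega
  rw [he, pow_succ]; ring

lemma pvT_append (s : List Int) (x : Int) :
    pvT (s ++ [x]) = pvT s + x * ((2:Int) ^ s.length - 1) - pvM s := by
  unfold pvT
  simp only [List.length_append, List.length_singleton]
  rw [sum_append_split]
  have he0 : s.length + 1 - 1 - s.length = 0 := by omega
  rw [he0, pow_zero]
  have hmid : (∑ k ∈ Finset.range s.length,
        s.getD k 0 * ((2:Int) ^ k - 2 ^ (s.length + 1 - 1 - k)))
      = (∑ k ∈ Finset.range s.length,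
        s.getD k 0 * ((2:Int) ^ k - 2 ^ (s.length - 1 - k))) - pvM s := by
    rw [pvM, ← Finset.sum_sub_distrib]
    refine Finset.sum_congr rfl (fun k hk => ?_)
    have hk' := Finset.mem_range.mp hk
    have he : s.length + 1 - 1 - k = (s.length - 1 - k) + 1 := by omega
    rw [he, pow_succ]; ring
  rw [hmid]; ring

lemma fold_inv (s : List Int) :
    s.foldl
      (fun (st : Int × Int × Int) x =>
        (st.1 + x * (st.2.1 - 1) - st.2.2, st.2.1 <<< (1 : Nat), 2 * st.2.2 + x))
      (0, 1, 0)
    = (pvT s, (2:Int) ^ s.length, pvM s) := by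
  induction s using List.reverseRecOn with
  | nil => simp [pvT, pvM]
  | append_singleton s x ih =>
      rw [List.foldl_append, ih, pvT_append, pvM_append]
      refine Prod.ext ?_ (Prod.ext ?_ ?_)
      · rfl
      · show (2:Int) ^ s.length <<< (1 : Nat) = 2 ^ (s ++ [x]).length
        rw [Int.shiftLeft_eq, List.length_append, List.length_singleton, pow_succ]
        ring
      · rfl

lemma foldA_aux (s : List Int) (n : Nat) :
    (PySem.List.pyRange 0 (n : Int) 1).foldl
      (fun sum_ i =>
        let add_count : Int := ((1 <<< i.toNat : Nat) : Int) - 1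
        let sub_count : Int := ((1 <<< ((s.length : Int) - i - 1).toNat : Nat) : Int) - 1
        sum_ + PySem.List.pyGetD s i 0 * (add_count - sub_count)) 0
    = ∑ k ∈ Finset.range n,
        PySem.List.pyGetD s (k : Int) 0 *
          ((((1 <<< k : Nat) : Int) - 1) -
            (((1 <<< ((s.length : Int) - (k : Int) - 1).toNat : Nat) : Int) - 1)) := by
  induction n with
  | zero => rw [PySem.List.pyRange_one_eq_nil (by omega)]; simp
  | succ n ih =>
      have hc : ((n + 1 : Nat) : Int) = (n : Int) + 1 := by push_cast; ring
      rw [hc, PySem.List.pyRange_one_succ_right (by omega), List.foldl_append, ih,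
          Finset.sum_range_succ]
      simp

lemma foldA_eq_pvT (s : List Int) :
    (PySem.List.pyRange 0 (s.length : Int) 1).foldl
      (fun sum_ i =>
        let add_count : Int := ((1 <<< i.toNat : Nat) : Int) - 1
        let sub_count : Int := ((1 <<< ((s.length : Int) - i - 1).toNat : Nat) : Int) - 1
        sum_ + PySem.List.pyGetD s i 0 * (add_count - sub_count)) 0
    = pvT s := by
  rw [foldA_aux, pvT]
  refine Finset.sum_congr rfl (fun k hk => ?_)
  have hk' : k < s.length := Finset.mem_range.mp hk
  have ht2 : ((s.length : Int) - (k : Int) - 1).toNat = s.length - 1 - k := by omega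
  rw [ht2, PySem.List.pyGetD_natCast]
  simp [Nat.shiftLeft_eq]

-- ===== VERDICT (by name: the statement is the Claim_ definition above) =====
theorem solve_spec : Claim_equal_solve := by
  intro A _
  show solve A = solve_alt A
  simp only [solve, solve_alt]
  rw [fold_inv, foldA_eq_pvT]
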